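-- pv_equiv track=rewrite | github.com/Shadowgar/hypertrophyapp | packages/core-engine/core_engine/decision_live_workout_guidance.py | _resolve_workout_overall_guidance
-- ===== SOURCE A (Python) =====
-- from typing import Any
--
-- def _resolve_workout_overall_guidance(percent_complete: int, exercise_summaries: list[dict[str, Any]]) -> str:
--     if percent_complete < 100:
--         return "finish_all_planned_sets_for_reliable_progression"
--     if any(str(item.get("guidance") or "") == "below_target_reps_reduce_or_hold_load" for item in exercise_summaries):
--         return "performance_below_target_adjust_load_and_recover"
--     if any(str(item.get("guidance") or "") == "above_target_reps_increase_load_next_exposure" for item in exercise_summaries):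
--         return "performance_above_target_progress_load"
--     return "solid_execution_maintain_progression"
-- ===== SOURCE B (Python) =====
-- _SEVERITY = {
--     "below_target_reps_reduce_or_hold_load": 2,
--     "above_target_reps_increase_load_next_exposure": 1,
-- }
--
-- _MESSAGES = [
--     "solid_execution_maintain_progression",
--     "performance_above_target_progress_load",
--     "performance_below_target_adjust_load_and_recover",
-- ]
--
--
-- def _resolve_workout_overall_guidance(percent_complete: int, exercise_summaries: list) -> str:
--     if percent_complete < 100:
--         return "finish_all_planned_sets_for_reliable_progression"
--     worst = 0
--     for item in exercise_summaries:
--         worst = max(worst, _SEVERITY.get(str(item.get("guidance") or ""), 0))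
--     return _MESSAGES[worst]
-- ===== Notes on version B (the rewrite author's own statement) =====
-- stated objective: alternative
-- what changed: Replaces A's two short-circuiting any(...) existence scans with a severity scoring scheme: each summary is mapped to a numeric rank (below=2, above=1, else=0), one fold takes the maximum rank, and the result indexes a message table, so the below-before-above priority comes from numeric ordering instead of branch order.
import Mathlib
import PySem

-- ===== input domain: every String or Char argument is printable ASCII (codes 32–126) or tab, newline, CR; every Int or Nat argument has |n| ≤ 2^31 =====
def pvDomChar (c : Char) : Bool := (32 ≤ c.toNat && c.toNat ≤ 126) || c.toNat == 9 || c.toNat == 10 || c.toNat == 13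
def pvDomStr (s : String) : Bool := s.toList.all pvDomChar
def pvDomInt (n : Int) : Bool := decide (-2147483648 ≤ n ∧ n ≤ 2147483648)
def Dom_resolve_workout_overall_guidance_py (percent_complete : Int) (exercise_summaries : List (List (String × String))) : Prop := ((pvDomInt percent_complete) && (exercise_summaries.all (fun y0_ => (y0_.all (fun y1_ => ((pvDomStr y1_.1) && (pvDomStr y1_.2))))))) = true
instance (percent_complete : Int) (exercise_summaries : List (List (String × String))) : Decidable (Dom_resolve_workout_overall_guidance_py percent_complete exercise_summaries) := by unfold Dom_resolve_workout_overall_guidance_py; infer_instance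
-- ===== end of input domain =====

-- B replaces A's two existence scans with a severity score (below=2, above=1, else=0), one max-fold, and a message table indexed by the maximum (alternative, same cost).

-- ===== PORT A =====
-- item.get("guidance") or "" : a missing key gives "", and an empty value stays "" — exactly getD "" (values are strings already, so str() is the identity)
def pvGuidance (item : List (String × String)) : String :=
  PySem.Dict.getD (PySem.Dict.mk item) "guidance" ""

def resolve_workout_overall_guidance_py (percent_complete : Int) (exercise_summaries : List (List (String × String))) : String :=
  if percent_complete < 100 then "finish_all_planned_sets_for_reliable_progression"
  else if exercise_summaries.any (fun item => pvGuidance item == "below_target_reps_reduce_or_hold_load") then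
    "performance_below_target_adjust_load_and_recover"
  else if exercise_summaries.any (fun item => pvGuidance item == "above_target_reps_increase_load_next_exposure") then
    "performance_above_target_progress_load"
  else "solid_execution_maintain_progression"

-- ===== PORT B =====
-- _SEVERITY.get(g, 0): the two-entry dict lookup with default 0
def pvSeverity (item : List (String × String)) : Nat :=
  if pvGuidance item == "below_target_reps_reduce_or_hold_load" then 2
  else if pvGuidance item == "above_target_reps_increase_load_next_exposure" then 1
  else 0

def pvMessages : List String :=
  ["solid_execution_maintain_progression",
   "performance_above_target_progress_load",
   "performance_below_target_adjust_load_and_recover"]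

def resolve_workout_overall_guidance_py_alt (percent_complete : Int) (exercise_summaries : List (List (String × String))) : String :=
  if percent_complete < 100 then "finish_all_planned_sets_for_reliable_progression"
  else
    let worst := exercise_summaries.foldl (fun w item => max w (pvSeverity item)) 0
    pvMessages.getD worst ""

-- ===== PRECONDITION & SPEC =====
def Spec_resolve_workout_overall_guidance_py (percent_complete : Int) (exercise_summaries : List (List (String × String))) (out : String) : Prop := out = resolve_workout_overall_guidance_py_alt percent_complete exercise_summaries
instance (percent_complete : Int) (exercise_summaries : List (List (String × String))) (out : String) : Decidable (Spec_resolve_workout_overall_guidance_py percent_complete exercise_summaries out) := by unfold Spec_resolve_workout_overall_guidance_py; infer_instance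

-- ===== CLAIM (what is proved, stated in full; the proofs are below) =====
def Claim_equal_resolve_workout_overall_guidance_py : Prop := ∀ (percent_complete : Int) (exercise_summaries : List (List (String × String))), Dom_resolve_workout_overall_guidance_py percent_complete exercise_summaries → Spec_resolve_workout_overall_guidance_py percent_complete exercise_summaries (resolve_workout_overall_guidance_py percent_complete exercise_summaries)

-- ===== LEMMAS AND PROOFS =====

-- the maximum severity, characterised by the two existence scans
def pvWorst (xs : List (List (String × String))) : Nat :=
  if xs.any (fun item => pvGuidance item == "below_target_reps_reduce_or_hold_load") then 2
  else if xs.any (fun item => pvGuidance item == "above_target_reps_increase_load_next_exposure") then 1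
  else 0

theorem pvWorst_cons (x : List (String × String)) (t : List (List (String × String))) :
    max (pvSeverity x) (pvWorst t) = pvWorst (x :: t) := by
  unfold pvSeverity pvWorst
  simp only [List.any_cons]
  split_ifs with h1 h2 h3 h4 h5 h6 h7 <;> simp_all [Nat.max_def] <;> tauto

theorem pvWorst_fold (xs : List (List (String × String))) (a : Nat) :
    xs.foldl (fun w item => max w (pvSeverity item)) a = max a (pvWorst xs) := by
  induction xs generalizing a with
  | nil => simp [pvWorst]
  | cons x t ih => rw [List.foldl_cons, ih, ← pvWorst_cons, Nat.max_assoc]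

-- ===== VERDICT (by name: the statement is the Claim_ definition above) =====
theorem resolve_workout_overall_guidance_py_spec : Claim_equal_resolve_workout_overall_guidance_py := by
  intro pc xs _
  unfold Spec_resolve_workout_overall_guidance_py
  unfold resolve_workout_overall_guidance_py resolve_workout_overall_guidance_py_alt
  by_cases h : pc < 100
  · simp [h]
  · simp only [h, if_false, pvWorst_fold, Nat.zero_max]
    unfold pvWorst
    split_ifs with h1 h2 <;> simp [pvMessages]
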